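-- pv_equiv track=rewrite | github.com/cylc/cylc-flow | cylc/flow/parsec/validate.py | parse_xtrig_arglist
-- ===== SOURCE A (Python) =====
-- from typing import List, Dict, Any, Optional, Tuple
--
-- def parse_xtrig_arglist(value: str) -> Tuple[List[Any], Dict[str, Any]]:
--     """Parse Pythonic-like arg/kwarg signatures.
--
--     A stateful parser treats all args/kwargs as strings with
--     implicit quoting.
--
--     Examples:
--         >>> parse = CylcConfigValidator.parse_xtrig_arglist
--
--         # Parse pythonic syntax
--         >>> parse('a, b, c, d=1, e=2,')
--         (['a', 'b', 'c'], {'d': '1', 'e': '2'})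
--         >>> parse('a, "1,2,3", b=",=",')
--         (['a', '"1,2,3"'], {'b': '",="'})
--         >>> parse('a, "b c", '"'d=e '")
--         (['a', '"b c"', "'d=e '"], {})
--
--         # Parse implicit (i.e. unquoted) strings
--         >>> parse('%(cycle)s, %(task)s, output=succeeded')
--         (['%(cycle)s', '%(task)s'], {'output': 'succeeded'})
--
--     """
--     # results
--     args = []
--     kwargs = {}
--     # state
--     in_str = False  # are we inside a quoted string
--     in_kwarg = False  # are we after the = sign of a kwarg
--     buffer = ''  # the current argument being parsed
--     kwarg_buffer = ''  # the key of a kwarg if in_kwarg == True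
--     # parser
--     for char in value:
--         if char in {'"', "'"}:
--             in_str = not in_str
--             buffer += char
--         elif not in_str and char == ',':
--             if in_kwarg:
--                 kwargs[kwarg_buffer.strip()] = buffer.strip()
--                 in_kwarg = False
--                 kwarg_buffer = ''
--             else:
--                 args.append(buffer.strip())
--             buffer = ''
--         elif char == '=' and not in_str and not in_kwarg:
--             in_kwarg = True
--             kwarg_buffer = buffer
--             buffer = ''
--         else:
--             buffer += char
--
--     # reached the end of the string
--     if buffer:
--         if in_kwarg:
--             kwargs[kwarg_buffer.strip()] = buffer.strip()
--         else:
--             args.append(buffer.strip())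
--
--     return args, kwargs
-- ===== SOURCE B (Python) =====
-- def _split_fields(value):
--     """Split on commas that occur outside quotes; returns the raw fields."""
--     fields = []
--     buf = []
--     in_str = False
--     for char in value:
--         if char in '"\'':
--             in_str = not in_str
--         if char == ',' and not in_str:
--             fields.append(''.join(buf))
--             buf = []
--         else:
--             buf.append(char)
--     fields.append(''.join(buf))
--     return fields
--
--
-- def _split_kv(field):
--     """Split a field at its first unquoted equals sign; (key or None, raw value)."""
--     in_str = False
--     for i, char in enumerate(field):
--         if char in '"\'':
--             in_str = not in_str
--         elif char == '=' and not in_str: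
--             return field[:i], field[i + 1:]
--     return None, field
--
--
-- def parse_xtrig_arglist(value):
--     entries = [_split_kv(field) for field in _split_fields(value)]
--     # the trailing field is kept only if its (raw) value part is non-empty
--     if entries and entries[-1][1] == '':
--         entries.pop()
--     args = [v.strip() for k, v in entries if k is None]
--     kwargs = {k.strip(): v.strip() for k, v in entries if k is not None}
--     return args, kwargs
-- ===== Notes on version B (the rewrite author's own statement) =====
-- stated objective: alternative
-- what changed: Replaces A's single stateful character loop (six mutable state variables tracking quote/kwarg mode and two buffers) by a two-phase pipeline: first tokenize into comma-separated fields (quote-aware), then split each field at its first unquoted equals sign and build args/kwargs from the resulting entry list.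
import Mathlib
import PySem

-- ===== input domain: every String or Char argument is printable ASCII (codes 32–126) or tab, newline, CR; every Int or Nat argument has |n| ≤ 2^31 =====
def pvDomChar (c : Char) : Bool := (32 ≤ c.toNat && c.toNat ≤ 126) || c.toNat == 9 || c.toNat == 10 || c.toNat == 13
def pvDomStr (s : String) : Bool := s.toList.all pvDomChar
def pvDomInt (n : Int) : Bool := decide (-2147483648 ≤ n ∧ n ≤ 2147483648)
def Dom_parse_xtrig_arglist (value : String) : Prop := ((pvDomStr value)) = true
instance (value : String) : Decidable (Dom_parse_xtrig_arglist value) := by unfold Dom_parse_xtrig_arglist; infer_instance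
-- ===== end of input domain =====

-- B replaces A's one stateful char loop by a tokenize-then-split-each-field pipeline (alternative decomposition, same cost).

-- ===== PORT A =====
-- A's parser loop: state (args, kwargs, in_str, in_kwarg, buffer, kwarg_buffer), one char at a time.
def pxaLoopA (args : List String) (kwargs : PySem.Dict String String) (in_str in_kwarg : Bool)
    (buffer kwarg_buffer : List Char) : List Char → List String × PySem.Dict String String
  | [] =>
      if buffer ≠ [] then
        if in_kwarg then
          (args, kwargs.insert (String.ofList (PySem.Chars.strip kwarg_buffer)) (String.ofList (PySem.Chars.strip buffer)))
        else
          (args ++ [String.ofList (PySem.Chars.strip buffer)], kwargs)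
      else (args, kwargs)
  | c :: cs =>
      if c = '"' ∨ c = '\'' then
        pxaLoopA args kwargs (!in_str) in_kwarg (buffer ++ [c]) kwarg_buffer cs
      else if in_str = false ∧ c = ',' then
        if in_kwarg then
          pxaLoopA args (kwargs.insert (String.ofList (PySem.Chars.strip kwarg_buffer)) (String.ofList (PySem.Chars.strip buffer)))
            in_str false [] [] cs
        else
          pxaLoopA (args ++ [String.ofList (PySem.Chars.strip buffer)]) kwargs in_str in_kwarg [] kwarg_buffer cs
      else if c = '=' ∧ in_str = false ∧ in_kwarg = false then
        pxaLoopA args kwargs in_str true [] buffer cs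
      else
        pxaLoopA args kwargs in_str in_kwarg (buffer ++ [c]) kwarg_buffer cs

def parse_xtrig_arglist (value : String) : List String × (List (String × String)) :=
  let r := pxaLoopA [] PySem.Dict.empty false false [] [] value.toList
  (r.1, r.2.items)

-- ===== PORT B =====
-- B helper: split on commas outside quotes, keeping every raw field (incl. the tail).
def pxbSplitFields (buf : List Char) (in_str : Bool) : List Char → List (List Char)
  | [] => [buf]
  | c :: cs =>
      let in_str' := if c = '"' ∨ c = '\'' then !in_str else in_str
      if c = ',' ∧ in_str' = false then buf :: pxbSplitFields [] in_str' cs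
      else pxbSplitFields (buf ++ [c]) in_str' cs

-- B helper: find the first unquoted equals sign; some (before, after) if found.
def pxbSplitKV (in_str : Bool) : List Char → Option (List Char × List Char)
  | [] => none
  | c :: cs =>
      if c = '"' ∨ c = '\'' then (pxbSplitKV (!in_str) cs).map (fun p => (c :: p.1, p.2))
      else if c = '=' ∧ in_str = false then some ([], cs)
      else (pxbSplitKV in_str cs).map (fun p => (c :: p.1, p.2))

-- B helper: a field as (key or none, raw value).
def pxbEntry (f : List Char) : Option (List Char) × List Char :=
  match pxbSplitKV false f with
  | some (k, v) => (some k, v)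
  | none => (none, f)

def parse_xtrig_arglist_alt (value : String) : List String × (List (String × String)) :=
  let entries := (pxbSplitFields [] false value.toList).map pxbEntry
  let entries2 :=
    match entries.getLast? with
    | some p => if p.2 = [] then entries.dropLast else entries
    | none => entries
  (entries2.filterMap (fun p =>
      match p.1 with
      | none => some (String.ofList (PySem.Chars.strip p.2))
      | some _ => none),
   (entries2.foldl (fun d p =>
      match p.1 with
      | none => d
      | some k => d.insert (String.ofList (PySem.Chars.strip k)) (String.ofList (PySem.Chars.strip p.2)))
      PySem.Dict.empty).items)

-- ===== PRECONDITION & SPEC =====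
def Spec_parse_xtrig_arglist (value : String) (out : List String × (List (String × String))) : Prop := out = parse_xtrig_arglist_alt value
instance (value : String) (out : List String × (List (String × String))) : Decidable (Spec_parse_xtrig_arglist value out) := by unfold Spec_parse_xtrig_arglist; infer_instance

-- ===== CLAIM (what is proved, stated in full; the proofs are below) =====
def Claim_equal_parse_xtrig_arglist : Prop := ∀ (value : String), Dom_parse_xtrig_arglist value → Spec_parse_xtrig_arglist value (parse_xtrig_arglist value)

-- ===== LEMMAS AND PROOFS =====

-- quote-parity of a field scanned from initial state b
def pxQt (b : Bool) (f : List Char) : Bool :=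
  f.foldl (fun s c => if c = '"' ∨ c = '\'' then !s else s) b

-- A's in_kwarg / buffer / kwarg_buffer state encoded from the raw field so far
def pxKw (f : List Char) : Bool := (pxbSplitKV false f).isSome
def pxVal (f : List Char) : List Char :=
  match pxbSplitKV false f with | some (_, v) => v | none => f
def pxKey (f : List Char) : List Char :=
  match pxbSplitKV false f with | some (k, _) => k | none => []

-- B's second phase generalized over accumulated args/kwargs
def pxProcess (args : List String) (kw : PySem.Dict String String) (fields : List (List Char)) :
    List String × PySem.Dict String String :=
  let entries := fields.map pxbEntry
  let entries2 :=
    match entries.getLast? with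
    | some p => if p.2 = [] then entries.dropLast else entries
    | none => entries
  (args ++ entries2.filterMap (fun p =>
      match p.1 with
      | none => some (String.ofList (PySem.Chars.strip p.2))
      | some _ => none),
   (entries2.foldl (fun d p =>
      match p.1 with
      | none => d
      | some k => d.insert (String.ofList (PySem.Chars.strip k)) (String.ofList (PySem.Chars.strip p.2)))
      kw))

lemma pxQt_append (b : Bool) (f : List Char) (c : Char) :
    pxQt b (f ++ [c]) = if c = '"' ∨ c = '\'' then !(pxQt b f) else pxQt b f := by
  simp [pxQt, List.foldl_append]

lemma pxQt_cons (b : Bool) (x : Char) (xs : List Char) :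
    pxQt b (x :: xs) = pxQt (if x = '"' ∨ x = '\'' then !b else b) xs := by
  by_cases h : x = '"' ∨ x = '\'' <;> simp [pxQt, h]

lemma splitKV_append_of_some : ∀ (f : List Char) (b : Bool) (k v : List Char) (c : Char),
    pxbSplitKV b f = some (k, v) → pxbSplitKV b (f ++ [c]) = some (k, v ++ [c])
  | [], b, k, v, c => by simp [pxbSplitKV]
  | x :: xs, b, k, v, c => by
    intro h
    by_cases hqx : x = '"' ∨ x = '\''
    · simp only [pxbSplitKV, List.cons_append, if_pos hqx] at h ⊢
      cases hx : pxbSplitKV (!b) xs with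
      | none => rw [hx] at h; simp at h
      | some p =>
        rw [hx] at h
        simp only [Option.map_some, Option.some.injEq, Prod.mk.injEq] at h
        rw [splitKV_append_of_some xs (!b) p.1 p.2 c hx]
        simp [← h.1, ← h.2]
    · by_cases hex : x = '=' ∧ b = false
      · simp only [pxbSplitKV, List.cons_append, if_neg hqx, if_pos hex,
          Option.some.injEq, Prod.mk.injEq] at h ⊢
        exact ⟨h.1, by rw [← h.2]⟩
      · simp only [pxbSplitKV, List.cons_append, if_neg hqx, if_neg hex] at h ⊢
        cases hx : pxbSplitKV b xs with
        | none => rw [hx] at h; simp at h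
        | some p =>
          rw [hx] at h
          simp only [Option.map_some, Option.some.injEq, Prod.mk.injEq] at h
          rw [splitKV_append_of_some xs b p.1 p.2 c hx]
          simp [← h.1, ← h.2]

lemma splitKV_append_of_none : ∀ (f : List Char) (b : Bool) (c : Char),
    pxbSplitKV b f = none → ¬(c = '=' ∧ pxQt b f = false) →
    pxbSplitKV b (f ++ [c]) = none
  | [], b, c => by
    intro _ hc
    simp only [pxQt, List.foldl_nil] at hc
    simp only [List.nil_append, pxbSplitKV]
    by_cases h1 : c = '"' ∨ c = '\''
    · rw [if_pos h1]; rfl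
    · rw [if_neg h1, if_neg hc]; rfl
  | x :: xs, b, c => by
    intro h hc
    rw [pxQt_cons] at hc
    by_cases hqx : x = '"' ∨ x = '\''
    · simp only [pxbSplitKV, List.cons_append, if_pos hqx, Option.map_eq_none_iff] at h ⊢
      exact splitKV_append_of_none xs (!b) c h (by simpa [hqx] using hc)
    · by_cases hex : x = '=' ∧ b = false
      · simp [pxbSplitKV, if_neg hqx, if_pos hex] at h
      · simp only [pxbSplitKV, List.cons_append, if_neg hqx, if_neg hex,
          Option.map_eq_none_iff] at h ⊢
        exact splitKV_append_of_none xs b c h (by simpa [hqx] using hc)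

lemma splitKV_append_eq : ∀ (f : List Char) (b : Bool),
    pxbSplitKV b f = none → pxQt b f = false →
    pxbSplitKV b (f ++ ['=']) = some (f, [])
  | [], b => by
    intro _ hq
    simp only [pxQt, List.foldl_nil] at hq
    simp [pxbSplitKV, hq]
  | x :: xs, b => by
    intro h hq
    rw [pxQt_cons] at hq
    by_cases hqx : x = '"' ∨ x = '\''
    · simp only [pxbSplitKV, List.cons_append, if_pos hqx, Option.map_eq_none_iff] at h ⊢
      rw [splitKV_append_eq xs (!b) h (by simpa [hqx] using hq)]
      rfl
    · by_cases hex : x = '=' ∧ b = false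
      · simp [pxbSplitKV, if_neg hqx, if_pos hex] at h
      · simp only [pxbSplitKV, List.cons_append, if_neg hqx, if_neg hex,
          Option.map_eq_none_iff] at h ⊢
        rw [splitKV_append_eq xs b h (by simpa [hqx] using hq)]
        rfl

lemma pxbSplitFields_ne_nil : ∀ (cs : List Char) (f : List Char) (b : Bool),
    pxbSplitFields f b cs ≠ []
  | [], f, b => by simp [pxbSplitFields]
  | c :: cs, f, b => by
    simp only [pxbSplitFields]
    by_cases h : c = ',' ∧ (if c = '"' ∨ c = '\'' then !b else b) = false
    · rw [if_pos h]; exact List.cons_ne_nil _ _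
    · rw [if_neg h]; exact pxbSplitFields_ne_nil cs _ _

lemma getLast?_cons_ne_nil {α : Type} (a : α) (l : List α) (h : l ≠ []) :
    (a :: l).getLast? = l.getLast? := by
  cases l with
  | nil => exact absurd rfl h
  | cons b t => exact List.getLast?_cons_cons ..

lemma pxProcess_cons (args : List String) (kw : PySem.Dict String String)
    (f : List Char) (fs : List (List Char)) (h : fs ≠ []) :
    pxProcess args kw (f :: fs) =
      match pxbSplitKV false f with
      | some (k, v) =>
          pxProcess args (kw.insert (String.ofList (PySem.Chars.strip k)) (String.ofList (PySem.Chars.strip v))) fs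
      | none => pxProcess (args ++ [String.ofList (PySem.Chars.strip f)]) kw fs := by
  have hm : fs.map pxbEntry ≠ [] := by simpa using h
  unfold pxProcess
  simp only [List.map_cons]
  rw [getLast?_cons_ne_nil _ _ hm]
  cases hg : (fs.map pxbEntry).getLast? with
  | none => exact absurd (List.getLast?_eq_none_iff.mp hg) hm
  | some q =>
    cases hkv : pxbSplitKV false f with
    | none =>
      have he : pxbEntry f = (none, f) := by simp [pxbEntry, hkv]
      by_cases hq2 : q.2 = []
      · simp only [if_pos hq2, List.dropLast_cons_of_ne_nil hm, he,
          List.filterMap_cons, List.foldl_cons, List.append_assoc, List.singleton_append]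
      · simp only [if_neg hq2, he, List.filterMap_cons, List.foldl_cons,
          List.append_assoc, List.singleton_append]
    | some p =>
      have he : pxbEntry f = (some p.1, p.2) := by simp [pxbEntry, hkv]
      by_cases hq2 : q.2 = []
      · simp only [if_pos hq2, List.dropLast_cons_of_ne_nil hm, he,
          List.filterMap_cons, List.foldl_cons]
      · simp only [if_neg hq2, he, List.filterMap_cons, List.foldl_cons]

lemma state_append (f : List Char) (c : Char)
    (hc : ¬(c = '=' ∧ pxQt false f = false ∧ pxKw f = false)) :
    pxKw (f ++ [c]) = pxKw f ∧ pxVal (f ++ [c]) = pxVal f ++ [c] ∧ pxKey (f ++ [c]) = pxKey f := by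
  cases hkv : pxbSplitKV false f with
  | none =>
    have hn : pxbSplitKV false (f ++ [c]) = none := by
      refine splitKV_append_of_none f false c hkv ?_
      rintro ⟨h1, h2⟩
      exact hc ⟨h1, h2, by simp [pxKw, hkv]⟩
    simp [pxKw, pxVal, pxKey, hkv, hn]
  | some p =>
    have hs : pxbSplitKV false (f ++ [c]) = some (p.1, p.2 ++ [c]) :=
      splitKV_append_of_some f false p.1 p.2 c hkv
    simp [pxKw, pxVal, pxKey, hkv, hs]

lemma state_append_eq (f : List Char) (h1 : pxQt false f = false) (h2 : pxKw f = false) :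
    pxKw (f ++ ['=']) = true ∧ pxVal (f ++ ['=']) = [] ∧ pxKey (f ++ ['=']) = f := by
  have hn : pxbSplitKV false f = none := by
    simpa [pxKw, Option.isSome_eq_false_iff, Option.isNone_iff_eq_none] using h2
  have hs := splitKV_append_eq f false hn h1
  simp [pxKw, pxVal, pxKey, hs]

lemma pxa_main : ∀ (cs : List Char) (args : List String) (kw : PySem.Dict String String) (f : List Char),
    pxaLoopA args kw (pxQt false f) (pxKw f) (pxVal f) (pxKey f) cs
      = pxProcess args kw (pxbSplitFields f (pxQt false f) cs)
  | [], args, kw, f => by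
    show pxaLoopA args kw (pxQt false f) (pxKw f) (pxVal f) (pxKey f) [] = pxProcess args kw [f]
    cases hkv : pxbSplitKV false f with
    | none =>
      have he : pxbEntry f = (none, f) := by simp [pxbEntry, hkv]
      have hv : pxVal f = f := by simp [pxVal, hkv]
      have hw : pxKw f = false := by simp [pxKw, hkv]
      by_cases hf : f = []
      · subst hf
        simp [pxaLoopA, pxProcess, pxbEntry, pxVal, pxbSplitKV]
      · simp [pxaLoopA, pxProcess, he, hv, hw, hf]
    | some p =>
      have he : pxbEntry f = (some p.1, p.2) := by simp [pxbEntry, hkv]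
      have hv : pxVal f = p.2 := by simp [pxVal, hkv]
      have hk : pxKey f = p.1 := by simp [pxKey, hkv]
      have hw : pxKw f = true := by simp [pxKw, hkv]
      by_cases hp : p.2 = []
      · simp [pxaLoopA, pxProcess, he, hv, hp]
      · simp [pxaLoopA, pxProcess, he, hv, hk, hw, hp]
  | c :: cs, args, kw, f => by
    by_cases hqc : c = '"' ∨ c = '\''
    · have hne : ¬(c = '=') := by rcases hqc with h | h <;> subst h <;> decide
      have hnc : ¬(c = ',') := by rcases hqc with h | h <;> subst h <;> decide
      obtain ⟨h1, h2, h3⟩ := state_append f c (fun h => hne h.1)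
      have hq' : pxQt false (f ++ [c]) = !pxQt false f := by
        rw [pxQt_append, if_pos hqc]
      have hA : pxaLoopA args kw (pxQt false f) (pxKw f) (pxVal f) (pxKey f) (c :: cs)
          = pxaLoopA args kw (!pxQt false f) (pxKw f) (pxVal f ++ [c]) (pxKey f) cs := by
        simp only [pxaLoopA, if_pos hqc]
      have hB : pxbSplitFields f (pxQt false f) (c :: cs)
          = pxbSplitFields (f ++ [c]) (!pxQt false f) cs := by
        simp only [pxbSplitFields, if_pos hqc]
        rw [if_neg (fun h => hnc h.1)]
      rw [hA, hB, ← hq', ← h1, ← h2, ← h3]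
      exact pxa_main cs args kw (f ++ [c])
    · by_cases hcm : c = ',' ∧ pxQt false f = false
      · -- flush at an unquoted comma
        obtain ⟨hc1, hq0⟩ := hcm
        subst hc1
        rw [hq0]
        have hB : pxbSplitFields f false (',' :: cs) = f :: pxbSplitFields [] false cs := by
          simp only [pxbSplitFields]
          rw [if_neg hqc, if_pos (by simp)]
        cases hkv : pxbSplitKV false f with
        | none =>
          have hv : pxVal f = f := by simp [pxVal, hkv]
          have hk : pxKey f = [] := by simp [pxKey, hkv]
          have hw : pxKw f = false := by simp [pxKw, hkv]
          have hA : pxaLoopA args kw false (pxKw f) (pxVal f) (pxKey f) (',' :: cs)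
              = pxaLoopA (args ++ [String.ofList (PySem.Chars.strip (pxVal f))]) kw
                  false (pxKw f) [] (pxKey f) cs := by
            simp only [pxaLoopA, if_neg hqc]
            rw [if_pos (by simp), if_neg (by rw [hw]; simp)]
          rw [hA, hB, pxProcess_cons _ _ _ _ (pxbSplitFields_ne_nil cs [] _), hkv, hv, hk, hw]
          exact pxa_main cs (args ++ [String.ofList (PySem.Chars.strip f)]) kw []
        | some p =>
          have hv : pxVal f = p.2 := by simp [pxVal, hkv]
          have hk : pxKey f = p.1 := by simp [pxKey, hkv]
          have hw : pxKw f = true := by simp [pxKw, hkv]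
          have hA : pxaLoopA args kw false (pxKw f) (pxVal f) (pxKey f) (',' :: cs)
              = pxaLoopA args (kw.insert (String.ofList (PySem.Chars.strip (pxKey f)))
                  (String.ofList (PySem.Chars.strip (pxVal f)))) false false [] [] cs := by
            simp only [pxaLoopA, if_neg hqc]
            rw [if_pos (by simp), if_pos (by rw [hw])]
          rw [hA, hB, pxProcess_cons _ _ _ _ (pxbSplitFields_ne_nil cs [] _), hkv, hv, hk]
          exact pxa_main cs args
            (kw.insert (String.ofList (PySem.Chars.strip p.1)) (String.ofList (PySem.Chars.strip p.2))) []
      · by_cases heq : c = '=' ∧ pxQt false f = false ∧ pxKw f = false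
        · -- equals-sign transition: start of a kwarg value
          obtain ⟨hc1, hq0, hw0⟩ := heq
          subst hc1
          obtain ⟨h1, h2, h3⟩ := state_append_eq f hq0 hw0
          have hn : pxbSplitKV false f = none := by
            simpa [pxKw, Option.isSome_eq_false_iff, Option.isNone_iff_eq_none] using hw0
          have hvf : pxVal f = f := by simp [pxVal, hn]
          have hq' : pxQt false (f ++ ['=']) = pxQt false f := by
            rw [pxQt_append, if_neg hqc]
          have hA : pxaLoopA args kw (pxQt false f) (pxKw f) (pxVal f) (pxKey f) ('=' :: cs)
              = pxaLoopA args kw (pxQt false f) true [] (pxVal f) cs := by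
            simp only [pxaLoopA, if_neg hqc]
            rw [if_neg (fun h => hcm ⟨h.2, h.1⟩), if_pos (by simp [hq0, hw0])]
          have hB : pxbSplitFields f (pxQt false f) ('=' :: cs)
              = pxbSplitFields (f ++ ['=']) (pxQt false f) cs := by
            simp only [pxbSplitFields]
            rw [if_neg hqc, if_neg hcm]
          have IH := pxa_main cs args kw (f ++ ['='])
          rw [h1, h2, h3, hq'] at IH
          rw [hA, hB, hvf]
          exact IH
        · -- plain character: append to the buffer
          obtain ⟨h1, h2, h3⟩ := state_append f c (by tauto)
          have hq' : pxQt false (f ++ [c]) = pxQt false f := by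
            rw [pxQt_append, if_neg hqc]
          have hA : pxaLoopA args kw (pxQt false f) (pxKw f) (pxVal f) (pxKey f) (c :: cs)
              = pxaLoopA args kw (pxQt false f) (pxKw f) (pxVal f ++ [c]) (pxKey f) cs := by
            simp only [pxaLoopA, if_neg hqc]
            rw [if_neg (fun h => hcm ⟨h.2, h.1⟩), if_neg (by tauto)]
          have hB : pxbSplitFields f (pxQt false f) (c :: cs)
              = pxbSplitFields (f ++ [c]) (pxQt false f) cs := by
            simp only [pxbSplitFields]
            rw [if_neg hqc, if_neg hcm]
          have IH := pxa_main cs args kw (f ++ [c])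
          rw [h1, h2, h3, hq'] at IH
          rw [hA, hB]
          exact IH

-- ===== VERDICT (by name: the statement is the Claim_ definition above) =====
theorem parse_xtrig_arglist_spec : Claim_equal_parse_xtrig_arglist := by
  intro value _
  unfold Spec_parse_xtrig_arglist parse_xtrig_arglist parse_xtrig_arglist_alt
  have h := pxa_main value.toList [] PySem.Dict.empty []
  have h0 : pxQt false [] = false := rfl
  rw [h0] at h
  have h1 : pxKw [] = false := rfl
  have h2 : pxVal [] = [] := rfl
  have h3 : pxKey [] = [] := rfl
  rw [h1, h2, h3] at h
  rw [h]
  simp [pxProcess]
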